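-- pv_equiv track=rewrite | github.com/AI4SCI-HDU/PX-MDsim | ndx_generater.py | generate_ndx_content_fixed
-- ===== SOURCE A (Python) =====
-- def generate_ndx_content_fixed(system_atoms, molecule_groups, frozen_atoms):
--     def format_index_with_correct_spaces(indices):
--         formatted_lines = []
--         line = ""
--         for i, index in enumerate(indices):
--             if i % 15 == 0 and i != 0:
--                 formatted_lines.append(line.rstrip())
--                 line = ""
--             space = " " * (5 - min(4, len(str(index))))
--             line += f"{index}{space}"
--         if line:
--             formatted_lines.append(line.rstrip())
--         return "\n".join(formatted_lines)
--
--     ndx_content_final = ""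
--     if system_atoms:
--         ndx_content_final += "[ System ]\n"
--         ndx_content_final += format_index_with_correct_spaces(system_atoms) + "\n\n"
--     if system_atoms:
--         ndx_content_final += "[ Other ]\n"
--         ndx_content_final += format_index_with_correct_spaces(system_atoms) + "\n"
--
--     for molecule_name, atoms in molecule_groups.items():
--         if atoms:
--             ndx_content_final += f"\n[ {molecule_name} ]\n"
--             ndx_content_final += format_index_with_correct_spaces(atoms) + "\n"
--
--     if frozen_atoms:
--         ndx_content_final += "\n[ frozen ]\n"
--         ndx_content_final += format_index_with_correct_spaces(frozen_atoms) + "\n"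
--
--     return ndx_content_final.rstrip()
-- ===== SOURCE B (Python) =====
-- def generate_ndx_content_fixed(system_atoms, molecule_groups, frozen_atoms):
--     # B: chunk-then-format decomposition (partition indices into 15-wide chunks,
--     # format each chunk independently), sections collected in a list and joined.
--     def field(idx):
--         return f"{idx}{' ' * (5 - min(4, len(str(idx))))}"
--
--     def format_block(indices):
--         chunks = []
--         i = 0
--         while i < len(indices):
--             chunks.append(indices[i:i + 15])
--             i += 15
--         return "\n".join(
--             "".join(field(i) for i in chunk).rstrip() for chunk in chunks
--         )
--
--     sections = []
--     if system_atoms: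
--         sections.append("[ System ]\n" + format_block(system_atoms) + "\n")
--         sections.append("\n[ Other ]\n" + format_block(system_atoms) + "\n")
--     for name, atoms in molecule_groups.items():
--         if atoms:
--             sections.append(f"\n[ {name} ]\n" + format_block(atoms) + "\n")
--     if frozen_atoms:
--         sections.append("\n[ frozen ]\n" + format_block(frozen_atoms) + "\n")
--     return "".join(sections).rstrip()
-- ===== Notes on version B (the rewrite author's own statement) =====
-- stated objective: alternative
-- what changed: The line formatter is rewritten from a single running-counter loop with i%15 boundary bookkeeping into chunk-then-format (partition indices into 15-wide chunks, format each chunk independently) and the output is assembled as a list of sections joined at the end instead of repeated string concatenation.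
import Mathlib
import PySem

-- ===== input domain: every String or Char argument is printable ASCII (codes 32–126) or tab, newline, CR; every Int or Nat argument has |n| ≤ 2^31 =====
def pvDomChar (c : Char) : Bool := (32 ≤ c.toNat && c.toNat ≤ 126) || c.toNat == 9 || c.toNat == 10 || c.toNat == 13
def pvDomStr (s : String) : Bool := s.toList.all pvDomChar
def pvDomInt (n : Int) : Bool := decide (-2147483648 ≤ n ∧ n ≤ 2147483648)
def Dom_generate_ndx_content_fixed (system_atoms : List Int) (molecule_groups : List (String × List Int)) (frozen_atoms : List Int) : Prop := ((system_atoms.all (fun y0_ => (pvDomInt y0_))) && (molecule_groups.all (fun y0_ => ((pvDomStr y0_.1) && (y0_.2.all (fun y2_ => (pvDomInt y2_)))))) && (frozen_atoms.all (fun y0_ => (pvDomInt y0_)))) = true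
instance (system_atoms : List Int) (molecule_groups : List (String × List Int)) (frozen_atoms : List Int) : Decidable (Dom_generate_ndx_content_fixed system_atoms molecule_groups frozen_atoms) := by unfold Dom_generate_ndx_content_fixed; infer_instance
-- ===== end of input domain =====

-- B rewrites the inner formatter from a running-counter loop into chunk-then-format and joins a
-- list of sections instead of concatenating onto one string (objective: alternative decomposition).


-- ===== PORT A =====
-- f"{index}{space}" with space = " " * (5 - min(4, len(str(index))))
def pvFieldA (index : Int) : List Char :=
  PySem.Int.toChars index ++ List.replicate (5 - min 4 (PySem.Int.toChars index).length) ' '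

-- the body of A's `for i, index in enumerate(indices):` loop; state = (formatted_lines, line)
def pvStepA (st : List (List Char) × List Char) (p : Int × Int) : List (List Char) × List Char :=
  let st := if PySem.Int.mod p.1 15 == 0 && p.1 != 0
            then (st.1 ++ [PySem.Chars.rstrip st.2], ([] : List Char))
            else st
  (st.1, st.2 ++ pvFieldA p.2)

-- A's trailing `if line: formatted_lines.append(line.rstrip())`
def pvFinishA (st : List (List Char) × List Char) : List (List Char) :=
  if st.2.isEmpty then st.1 else st.1 ++ [PySem.Chars.rstrip st.2]

-- format_index_with_correct_spaces
def pvFmtA (indices : List Int) : List Char :=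
  PySem.Chars.join ['\n'] (pvFinishA ((PySem.List.enumerate indices 0).foldl pvStepA ([], [])))

def generate_ndx_content_fixed (system_atoms : List Int) (molecule_groups : List (String × List Int)) (frozen_atoms : List Int) : String :=
  let c : List Char := []
  let c := if system_atoms ≠ [] then c ++ "[ System ]\n".toList ++ pvFmtA system_atoms ++ "\n\n".toList else c
  let c := if system_atoms ≠ [] then c ++ "[ Other ]\n".toList ++ pvFmtA system_atoms ++ "\n".toList else c
  let c := molecule_groups.foldl
    (fun c p => if p.2 ≠ [] then c ++ "\n[ ".toList ++ p.1.toList ++ " ]\n".toList ++ pvFmtA p.2 ++ "\n".toList else c) c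
  let c := if frozen_atoms ≠ [] then c ++ "\n[ frozen ]\n".toList ++ pvFmtA frozen_atoms ++ "\n".toList else c
  String.ofList (PySem.Chars.rstrip c)

-- ===== PORT B =====
def pvFieldB (idx : Int) : List Char :=
  PySem.Int.toChars idx ++ List.replicate (5 - min 4 (PySem.Int.toChars idx).length) ' '

-- while i < len(indices): chunks.append(indices[i:i+15]); i += 15
-- (the loop counter i starts at 0 and only grows, so it is carried as a Nat)
def pvChunksB (indices : List Int) (i : Nat) : List (List Int) :=
  if i < indices.length then
    PySem.List.slice indices (some (i : Int)) (some ((i : Int) + 15)) :: pvChunksB indices (i + 15)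
  else []
termination_by indices.length - i

def pvFmtB (indices : List Int) : List Char :=
  PySem.Chars.join ['\n'] ((pvChunksB indices 0).map (fun chunk =>
    PySem.Chars.rstrip (PySem.Chars.join [] (chunk.map pvFieldB))))

def generate_ndx_content_fixed_alt (system_atoms : List Int) (molecule_groups : List (String × List Int)) (frozen_atoms : List Int) : String :=
  let sections : List (List Char) := []
  let sections := if system_atoms ≠ [] then
      sections ++ ["[ System ]\n".toList ++ pvFmtB system_atoms ++ ['\n'],
                   "\n[ Other ]\n".toList ++ pvFmtB system_atoms ++ ['\n']]
    else sections
  let sections := molecule_groups.foldl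
    (fun s p => if p.2 ≠ [] then s ++ ["\n[ ".toList ++ p.1.toList ++ " ]\n".toList ++ pvFmtB p.2 ++ ['\n']] else s) sections
  let sections := if frozen_atoms ≠ [] then sections ++ ["\n[ frozen ]\n".toList ++ pvFmtB frozen_atoms ++ ['\n']] else sections
  String.ofList (PySem.Chars.rstrip (PySem.Chars.join [] sections))

-- ===== PRECONDITION & SPEC =====
-- molecule_groups stands for a Python dict, whose keys are necessarily distinct; Pre_ states only that.
def Pre_generate_ndx_content_fixed (system_atoms : List Int) (molecule_groups : List (String × List Int)) (frozen_atoms : List Int) : Prop :=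
  (molecule_groups.map Prod.fst).Nodup
instance (system_atoms : List Int) (molecule_groups : List (String × List Int)) (frozen_atoms : List Int) : Decidable (Pre_generate_ndx_content_fixed system_atoms molecule_groups frozen_atoms) := by unfold Pre_generate_ndx_content_fixed; infer_instance
def pvWitness_generate_ndx_content_fixed : List Int × (List (String × List Int)) × List Int :=
  ([1, 23456, -7], [("SOL", [1, 2, 3]), ("LIG", [])], [2])
def Spec_generate_ndx_content_fixed (system_atoms : List Int) (molecule_groups : List (String × List Int)) (frozen_atoms : List Int) (out : String) : Prop := out = generate_ndx_content_fixed_alt system_atoms molecule_groups frozen_atoms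
instance (system_atoms : List Int) (molecule_groups : List (String × List Int)) (frozen_atoms : List Int) (out : String) : Decidable (Spec_generate_ndx_content_fixed system_atoms molecule_groups frozen_atoms out) := by unfold Spec_generate_ndx_content_fixed; infer_instance

-- ===== CLAIM (what is proved, stated in full; the proofs are below) =====
def Claim_equal_generate_ndx_content_fixed : Prop := ∀ (system_atoms : List Int) (molecule_groups : List (String × List Int)) (frozen_atoms : List Int), Dom_generate_ndx_content_fixed system_atoms molecule_groups frozen_atoms → Pre_generate_ndx_content_fixed system_atoms molecule_groups frozen_atoms → Spec_generate_ndx_content_fixed system_atoms molecule_groups frozen_atoms (generate_ndx_content_fixed system_atoms molecule_groups frozen_atoms)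

-- ===== LEMMAS AND PROOFS =====

theorem pvJoin_nil_eq_flatten (parts : List (List Char)) :
    PySem.Chars.join [] parts = parts.flatten := by
  induction parts with
  | nil => simp [PySem.Chars.join_nil]
  | cons a t ih =>
    cases t with
    | nil => simp [PySem.Chars.join_singleton]
    | cons b u => rw [PySem.Chars.join_cons_cons, List.flatten_cons, ih]; simp

theorem pvField_ne_nil (i : Int) : pvFieldA i ≠ [] := by
  unfold pvFieldA
  intro h
  rcases List.append_eq_nil_iff.mp h with ⟨-, h2⟩
  simp [List.replicate_eq_nil_iff] at h2
  omega

theorem pvLineOf_ne_nil (c : List Int) (h : c ≠ []) : ((c.map pvFieldA).flatten) ≠ [] := by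
  cases c with
  | nil => exact absurd rfl h
  | cons y u =>
    simp only [List.map_cons, List.flatten_cons]
    intro hc
    exact pvField_ne_nil y (List.append_eq_nil_iff.mp hc).1

-- proof-side view of B's chunking: structural recursion by take/drop
def pvChunksRec (xs : List Int) : List (List Int) :=
  if xs = [] then [] else xs.take 15 :: pvChunksRec (xs.drop 15)
termination_by xs.length
decreasing_by
  cases xs with
  | nil => simp at *
  | cons a t => simp

theorem pvChunksRec_nil : pvChunksRec [] = [] := by
  rw [pvChunksRec]
  simp

theorem pvChunksRec_cons (xs : List Int) (h : xs ≠ []) :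
    pvChunksRec xs = xs.take 15 :: pvChunksRec (xs.drop 15) := by
  rw [pvChunksRec]
  simp [h]

theorem pvChunksB_eq_rec (xs : List Int) : ∀ i : Nat, pvChunksB xs i = pvChunksRec (xs.drop i) := by
  intro i
  induction hn : xs.length - i using Nat.strong_induction_on generalizing i with
  | _ n ih =>
    rw [pvChunksB]
    by_cases hi : i < xs.length
    · rw [if_pos hi]
      have hslice : PySem.List.slice xs (some (i : Int)) (some ((i : Int) + 15))
          = (xs.drop i).take 15 := by
        have := PySem.List.slice_natCast_add xs i 15
        exact_mod_cast this
      have hdrop : xs.drop (i + 15) = (xs.drop i).drop 15 := by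
        rw [List.drop_drop]
      have hrec := pvChunksRec_cons (xs.drop i) (by
        intro hc
        rw [List.drop_eq_nil_iff] at hc
        omega)
      rw [hslice, ih (xs.length - (i + 15)) (by omega) (i + 15) rfl, hdrop, hrec]
    · rw [if_neg hi]
      rw [List.drop_eq_nil_iff.mpr (by omega), pvChunksRec_nil]

-- L1: a run of indices on which the i%15 boundary never fires just appends fields to line
theorem pvRunA (xs : List Int) : ∀ (s : Int) (fl : List (List Char)) (line : List Char),
    (∀ k : Nat, k < xs.length → ((15:Int) ∣ (s + k) → s + (k:Int) = 0)) →
    (PySem.List.enumerate xs s).foldl pvStepA (fl, line) = (fl, line ++ (xs.map pvFieldA).flatten) := by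
  induction xs with
  | nil => intro s fl line _; simp [PySem.List.enumerate_nil]
  | cons x t ih =>
    intro s fl line h
    rw [PySem.List.enumerate_cons, List.foldl_cons]
    have h0 : (15:Int) ∣ s → s = 0 := by
      have := h 0 (by simp)
      simpa using this
    have hcond : ¬((15:Int) ∣ s ∧ ¬ s = 0) := fun hh => hh.2 (h0 hh.1)
    have hstep : pvStepA (fl, line) (s, x) = (fl, line ++ pvFieldA x) := by
      simp [pvStepA, hcond]
    rw [hstep, ih (s+1) fl (line ++ pvFieldA x) (fun k hk => by
      have := h (k+1) (by simpa using Nat.succ_lt_succ hk)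
      rw [show s + 1 + (k:Int) = s + ((k+1:Nat):Int) by push_cast; ring]
      exact this)]
    simp

-- L2: a chunk starting at a nonzero multiple of 15 flushes the line, then fills a fresh one
theorem pvChunkA (c : List Int) (s : Int) (fl : List (List Char)) (line : List Char)
    (hne : c ≠ []) (hlen : c.length ≤ 15) (hdvd : (15:Int) ∣ s) (hs : s ≠ 0) :
    (PySem.List.enumerate c s).foldl pvStepA (fl, line)
      = (fl ++ [PySem.Chars.rstrip line], (c.map pvFieldA).flatten) := by
  cases c with
  | nil => exact absurd rfl hne
  | cons x t =>
    rw [PySem.List.enumerate_cons, List.foldl_cons]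
    have hstep : pvStepA (fl, line) (s, x) = (fl ++ [PySem.Chars.rstrip line], [] ++ pvFieldA x) := by
      simp [pvStepA, hdvd, hs]
    rw [hstep, pvRunA t (s+1) _ _ (fun k hk => by
      intro hd
      exfalso
      have hk14 : (k:Int) + 1 ≤ 14 := by
        have ht : t.length < 15 := by simpa using hlen
        have : (k:Int) < 14 := by exact_mod_cast Nat.lt_of_lt_of_le hk (by omega)
        omega
      omega)]
    simp

-- L3: the whole tail after the first chunk, chunk by chunk
theorem pvTailA (n : Nat) : ∀ (xs : List Int) (m : Nat) (fl : List (List Char)) (line : List Char),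
    xs.length ≤ n → 1 ≤ m → line ≠ [] →
    pvFinishA ((PySem.List.enumerate xs ((15 * m : Nat) : Int)).foldl pvStepA (fl, line))
      = fl ++ [PySem.Chars.rstrip line]
          ++ (pvChunksRec xs).map (fun c => PySem.Chars.rstrip ((c.map pvFieldA).flatten)) := by
  induction n with
  | zero =>
    intro xs m fl line hlen _ hline
    have : xs = [] := List.eq_nil_of_length_eq_zero (by omega)
    subst this
    simp [PySem.List.enumerate_nil, pvFinishA, pvChunksRec_nil, hline]
  | succ n ih =>
    intro xs m fl line hlen hm hline
    by_cases hxs : xs = []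
    · subst hxs; simp [PySem.List.enumerate_nil, pvFinishA, pvChunksRec_nil, hline]
    · have hsplit : xs.take 15 ++ xs.drop 15 = xs := List.take_append_drop 15 xs
      have henum : PySem.List.enumerate xs ((15 * m : Nat) : Int)
          = PySem.List.enumerate (xs.take 15) ((15 * m : Nat) : Int)
            ++ PySem.List.enumerate (xs.drop 15) (((15 * m : Nat) : Int) + (xs.take 15).length) := by
        conv_lhs => rw [← hsplit]
        rw [PySem.List.enumerate_append]
      have htake_ne : xs.take 15 ≠ [] := by
        cases xs with | nil => exact absurd rfl hxs | cons a t => simp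
      have hlineC := pvLineOf_ne_nil (xs.take 15) htake_ne
      rw [henum, List.foldl_append,
          pvChunkA _ _ _ _ htake_ne (by simp) ⟨(m:Int), by push_cast; ring⟩
            (show ((15 * m : Nat) : Int) ≠ 0 by push_cast; omega),
          pvChunksRec_cons xs hxs]
      by_cases hdrop : xs.drop 15 = []
      · rw [hdrop]
        simp only [PySem.List.enumerate_nil, List.foldl_nil]
        unfold pvFinishA
        rw [if_neg (by simpa [List.isEmpty_iff] using hlineC)]
        rw [pvChunksRec_nil]
        simp
      · have hlt : 15 < xs.length := by
          by_contra hle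
          exact hdrop (List.drop_eq_nil_of_le (by omega))
        have hlen15 : (xs.take 15).length = 15 := by
          rw [List.length_take]; omega
        rw [show ((15 * m : Nat) : Int) + ((xs.take 15).length : Int) = ((15 * (m+1) : Nat) : Int) by
              rw [hlen15]; push_cast; ring]
        rw [ih (xs.drop 15) (m+1) _ _ (by rw [List.length_drop]; omega) (by omega) hlineC]
        simp [List.append_assoc]

theorem pvFieldB_eq : pvFieldB = pvFieldA := rfl

theorem pvFmtA_eq_pvFmtB (indices : List Int) : pvFmtA indices = pvFmtB indices := by
  by_cases h : indices = []
  · subst h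
    simp [pvFmtA, pvFmtB, PySem.List.enumerate_nil, pvFinishA, pvChunksB_eq_rec, pvChunksRec_nil]
  · unfold pvFmtA pvFmtB
    rw [pvChunksB_eq_rec indices 0, List.drop_zero]
    have hsplit : indices.take 15 ++ indices.drop 15 = indices := List.take_append_drop 15 indices
    have htake_ne : indices.take 15 ≠ [] := by
      cases indices with | nil => exact absurd rfl h | cons a t => simp
    have hlineC := pvLineOf_ne_nil (indices.take 15) htake_ne
    have henum : PySem.List.enumerate indices 0
        = PySem.List.enumerate (indices.take 15) 0
          ++ PySem.List.enumerate (indices.drop 15) ((0:Int) + (indices.take 15).length) := by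
      conv_lhs => rw [← hsplit]
      rw [PySem.List.enumerate_append]
    rw [henum, List.foldl_append,
        pvRunA (indices.take 15) 0 [] [] (fun k hk => by
          intro hd
          have hk15 : k < 15 := Nat.lt_of_lt_of_le hk (by simp)
          have : (0:Int) + k = 0 ∨ ¬ (15:Int) ∣ (0 + k) := by
            rcases Nat.eq_zero_or_pos k with h0 | h0
            · left; simp [h0]
            · right; have : (0:Int) + k = (k:Int) := by ring
              rw [this]; omega
          rcases this with h1 | h1
          · exact h1
          · exact absurd hd h1),
        pvChunksRec_cons indices h]
    simp only [List.nil_append]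
    by_cases hdrop : indices.drop 15 = []
    · rw [hdrop]
      simp only [PySem.List.enumerate_nil, List.foldl_nil]
      unfold pvFinishA
      rw [if_neg (by simpa [List.isEmpty_iff] using hlineC)]
      rw [pvChunksRec_nil]
      simp [pvJoin_nil_eq_flatten, pvFieldB_eq]
    · rw [show ((0:Int) + ((indices.take 15).length : Int)) = ((15 * 1 : Nat) : Int) by
            have hlt : 15 < indices.length := by
              by_contra hle
              exact hdrop (List.drop_eq_nil_of_le (by omega))
            rw [List.length_take]; push_cast; omega]
      rw [pvTailA (indices.drop 15).length (indices.drop 15) 1 [] _ le_rfl le_rfl hlineC]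
      simp [pvJoin_nil_eq_flatten, pvFieldB_eq]

-- string-literal characters, spelled out
theorem pvL_sys : "[ System ]\n".toList = ['[', ' ', 'S', 'y', 's', 't', 'e', 'm', ' ', ']', '\n'] := rfl
theorem pvL_nn : "\n\n".toList = ['\n', '\n'] := rfl
theorem pvL_oth : "[ Other ]\n".toList = ['[', ' ', 'O', 't', 'h', 'e', 'r', ' ', ']', '\n'] := rfl
theorem pvL_n : "\n".toList = ['\n'] := rfl

-- the molecule loop: A's string accumulator tracks the flatten of B's section list
theorem pvMolFold (mg : List (String × List Int)) : ∀ (secs : List (List Char)),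
    mg.foldl (fun c p => if p.2 ≠ [] then c ++ "\n[ ".toList ++ p.1.toList ++ " ]\n".toList ++ pvFmtA p.2 ++ "\n".toList else c) secs.flatten
    = (mg.foldl (fun s p => if p.2 ≠ [] then s ++ ["\n[ ".toList ++ p.1.toList ++ " ]\n".toList ++ pvFmtB p.2 ++ ['\n']] else s) secs).flatten := by
  induction mg with
  | nil => intro secs; rfl
  | cons p t ih =>
    intro secs
    simp only [List.foldl_cons]
    by_cases hp : p.2 ≠ []
    · rw [if_pos hp, if_pos hp]
      have hsec : secs.flatten ++ "\n[ ".toList ++ p.1.toList ++ " ]\n".toList ++ pvFmtA p.2 ++ "\n".toList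
           = (secs ++ ["\n[ ".toList ++ p.1.toList ++ " ]\n".toList ++ pvFmtB p.2 ++ ['\n']]).flatten := by
        rw [pvFmtA_eq_pvFmtB, pvL_n]
        simp [List.append_assoc]
      rw [hsec, ih]
    · rw [if_neg hp, if_neg hp]
      exact ih secs

-- System/Other header: A's two conditional appends equal the flatten of B's two sections
theorem pvSys (sa : List Int) (c0 : List Char)
    (hc : c0 = if sa ≠ [] then ([] : List Char) ++ "[ System ]\n".toList ++ pvFmtA sa ++ "\n\n".toList else []) :
    (if sa ≠ [] then c0 ++ "[ Other ]\n".toList ++ pvFmtA sa ++ "\n".toList else c0)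
    = (if sa ≠ [] then ([] : List (List Char)) ++ ["[ System ]\n".toList ++ pvFmtB sa ++ ['\n'], "\n[ Other ]\n".toList ++ pvFmtB sa ++ ['\n']] else []).flatten := by
  subst hc
  by_cases hsa : sa ≠ []
  · rw [if_pos hsa, if_pos hsa, if_pos hsa]
    simp only [List.nil_append, List.flatten_cons, List.flatten_nil, List.append_nil,
      pvFmtA_eq_pvFmtB]
    simp only [pvL_sys, pvL_nn, pvL_oth, pvL_n, List.cons_append, List.nil_append,
      List.append_assoc]
    rfl
  · simp [hsa]

-- molecule loop plus frozen section, with A's accumulator tracking B's section list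
theorem pvAsm (mg : List (String × List Int)) (fa : List Int) (c : List Char)
    (secs : List (List Char)) (h : c = secs.flatten) :
    (if fa ≠ [] then (mg.foldl (fun c p => if p.2 ≠ [] then c ++ "\n[ ".toList ++ p.1.toList ++ " ]\n".toList ++ pvFmtA p.2 ++ "\n".toList else c) c) ++ "\n[ frozen ]\n".toList ++ pvFmtA fa ++ "\n".toList
     else mg.foldl (fun c p => if p.2 ≠ [] then c ++ "\n[ ".toList ++ p.1.toList ++ " ]\n".toList ++ pvFmtA p.2 ++ "\n".toList else c) c)
    = (if fa ≠ [] then (mg.foldl (fun s p => if p.2 ≠ [] then s ++ ["\n[ ".toList ++ p.1.toList ++ " ]\n".toList ++ pvFmtB p.2 ++ ['\n']] else s) secs) ++ ["\n[ frozen ]\n".toList ++ pvFmtB fa ++ ['\n']]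
       else mg.foldl (fun s p => if p.2 ≠ [] then s ++ ["\n[ ".toList ++ p.1.toList ++ " ]\n".toList ++ pvFmtB p.2 ++ ['\n']] else s) secs).flatten := by
  subst h
  rw [pvMolFold]
  by_cases hfa : fa ≠ []
  · rw [if_pos hfa, if_pos hfa, pvFmtA_eq_pvFmtB, pvL_n]
    simp [List.append_assoc]
  · rw [if_neg hfa, if_neg hfa]

-- ===== VERDICT (by name: the statement is the Claim_ definition above) =====
theorem generate_ndx_content_fixed_spec : Claim_equal_generate_ndx_content_fixed := by
  unfold Claim_equal_generate_ndx_content_fixed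
  intro sa mg fa _ _
  unfold Spec_generate_ndx_content_fixed generate_ndx_content_fixed generate_ndx_content_fixed_alt
  dsimp only
  rw [pvJoin_nil_eq_flatten]
  exact congrArg String.ofList (congrArg PySem.Chars.rstrip (pvAsm mg fa _ _ (pvSys sa _ rfl)))
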